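-- pv_equiv track=rewrite | github.com/abdbbdii/prize-bond-finder | abdQOL.py | clean_csv_by_col_list
-- ===== SOURCE A (Python) =====
-- def clean_csv_by_col_list(data: list):
--     cleaned_rows = [[] for _ in range(len(data[0]) if data else 0)]
--     # Clean the CSV data
--     for row in data:
--         for i, cell in enumerate(row):
--             if str(cell).strip():
--                 cleaned_rows[i].append(cell)
--     # Determine the maximum length among cleaned columns
--     max_length = max(len(column) for column in cleaned_rows)
--     # Pad shorter columns with empty strings to match the maximum length
--     cleaned_rows = [column + [""] * (max_length - len(column)) for column in cleaned_rows]
--     # Transpose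
--     return list(map(list, zip(*cleaned_rows)))
-- ===== SOURCE B (Python) =====
-- def clean_csv_by_col_list(data: list):
--     # One row-major pass that drops each non-blank cell straight into the output
--     # grid ("gravity" compaction): no per-column lists, no padding, no transpose.
--     width = len(data[0])
--     out = []
--     fill = [0] * width          # fill[j] = rows already occupied in column j
--     for row in data:
--         for j, cell in enumerate(row):
--             if str(cell).strip():
--                 r = fill[j]
--                 if r == len(out):
--                     out.append([""] * width)
--                 out[r][j] = cell
--                 fill[j] += 1
--     return out
-- ===== Notes on version B (the rewrite author's own statement) =====
-- stated objective: alternative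
-- what changed: B never builds per-column lists at all: a single row-major pass drops each non-blank cell directly into its final grid position out[fill[j]][j] (gravity compaction with a per-column fill counter, growing the grid by one padded row on demand), replacing A's column gathering + padding pass + zip(*) transpose.
-- outside the precondition, e.g. on clean_csv_by_col_list([]): A raises ValueError, B raises IndexError; on clean_csv_by_col_list([[]]): A raises ValueError, B returns []; on clean_csv_by_col_list([['a'], ['b', 'c']]): A raises IndexError, B raises IndexError
import Mathlib
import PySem

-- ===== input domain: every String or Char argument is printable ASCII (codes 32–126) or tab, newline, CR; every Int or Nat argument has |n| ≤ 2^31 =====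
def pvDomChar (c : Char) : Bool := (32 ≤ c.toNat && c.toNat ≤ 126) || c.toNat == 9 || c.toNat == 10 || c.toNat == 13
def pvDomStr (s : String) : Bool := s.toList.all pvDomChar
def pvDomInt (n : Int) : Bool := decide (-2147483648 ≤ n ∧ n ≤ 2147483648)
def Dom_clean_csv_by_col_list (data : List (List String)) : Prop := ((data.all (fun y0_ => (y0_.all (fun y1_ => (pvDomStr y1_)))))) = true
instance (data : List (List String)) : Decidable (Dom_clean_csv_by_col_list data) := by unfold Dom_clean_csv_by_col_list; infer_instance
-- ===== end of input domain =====

-- B replaces A's column gathering + padding pass + zip(*) transpose by a single row-major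
-- pass that writes each non-blank cell directly into its final grid slot out[fill[j]][j],
-- growing the grid one blank row at a time (objective: alternative).


-- ===== PORT A =====

-- inner loop body of A: `for i, cell in enumerate(row): if str(cell).strip(): cleaned_rows[i].append(cell)`
-- (enumerate indices are ≥ 0, so `.toNat` is exact; an out-of-range i with a non-blank cell is a
-- Python IndexError and lies outside Pre_)
def pvCleanStep (cols : List (List String)) (row : List String) : List (List String) :=
  (PySem.List.enumerate row 0).foldl
    (fun cs p => if PySem.Str.strip p.2 ≠ "" then cs.modify p.1.toNat (· ++ [p.2]) else cs) cols

-- termination measure helper for pvZipStar (used by its decreasing_by)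
theorem pvSumTailLt (cols : List (List String)) (h1 : ¬ (cols = [] ∨ cols.any (·.isEmpty))) :
    ((cols.map (·.tail)).map List.length).sum < (cols.map List.length).sum := by
  rw [not_or] at h1
  obtain ⟨hne, hall⟩ := h1
  cases cols with
  | nil => exact absurd rfl hne
  | cons c cs =>
    simp only [List.any_cons] at hall
    have hc : c ≠ [] := by
      intro h; subst h; simp at hall
    have h1 : c.tail.length < c.length := by
      cases c with
      | nil => exact absurd rfl hc
      | cons a as => simp
    have h2 : ((cs.map (·.tail)).map List.length).sum ≤ (cs.map List.length).sum := by
      rw [List.map_map]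
      exact List.sum_le_sum (fun x _ => by cases x <;> simp)
    simp only [List.map_cons, List.sum_cons]
    omega

-- `zip(*cols)` as Python computes it: rows of heads while every list is non-empty
def pvZipStar (cols : List (List String)) : List (List String) :=
  if h : cols = [] ∨ cols.any (·.isEmpty) then []
  else (cols.map (·.headD "")) :: pvZipStar (cols.map (·.tail))
termination_by (cols.map List.length).sum
decreasing_by simpa using pvSumTailLt cols h

def clean_csv_by_col_list (data : List (List String)) : List (List String) :=
  let cols0 := List.replicate (if data.isEmpty then 0 else (data.headD []).length) ([] : List String)
  let cols := data.foldl pvCleanStep cols0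
  -- `max(...)` raises ValueError when cols = [] (data empty or first row empty): outside Pre_
  let maxLen := (PySem.List.max? (cols.map (·.length)) (fun x => x)).getD 0
  let padded := cols.map (fun c => c ++ List.replicate (maxLen - c.length) "")
  pvZipStar padded

-- ===== PORT B =====

-- one placement: `r = fill[j]; if r == len(out): out.append([""]*width); out[r][j] = cell; fill[j] += 1`
-- (`fill[j]` with j ≥ width is a Python IndexError, outside Pre_; the port's getD/no-op set is unreached there under Pre_)
def pvPlace (w : Nat) (st : List (List String) × List Nat) (j : Nat) (cell : String) :
    List (List String) × List Nat :=
  let r := st.2.getD j 0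
  let out := if r = st.1.length then st.1 ++ [List.replicate w ""] else st.1
  (out.modify r (fun rw => rw.set j cell), st.2.modify j (· + 1))

-- inner loop of B: `for j, cell in enumerate(row): if str(cell).strip(): <place>`
def pvBRow (w : Nat) (st : List (List String) × List Nat) (row : List String) :
    List (List String) × List Nat :=
  (PySem.List.enumerate row 0).foldl
    (fun st p => if PySem.Str.strip p.2 ≠ "" then pvPlace w st p.1.toNat p.2 else st) st

def clean_csv_by_col_list_alt (data : List (List String)) : List (List String) :=
  let w := (data.headD []).length  -- data[0]: IndexError on empty data, outside Pre_
  (data.foldl (pvBRow w) ([], List.replicate w 0)).1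

-- ===== PRECONDITION & SPEC =====
-- Pre_ excludes exactly the inputs where A raises: empty data and an empty first row
-- (ValueError from max() over no columns), and a row carrying a NON-blank cell at an index
-- ≥ len(data[0]) (IndexError when appending to a missing column).
def Pre_clean_csv_by_col_list (data : List (List String)) : Prop :=
  data ≠ [] ∧ (data.headD []).length ≠ 0 ∧
    ∀ row ∈ data, ∀ i : Nat, i < row.length → (data.headD []).length ≤ i →
      PySem.Str.strip (row.getD i "") = ""
instance (data : List (List String)) : Decidable (Pre_clean_csv_by_col_list data) := by
  unfold Pre_clean_csv_by_col_list; infer_instance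

def pvWitness_clean_csv_by_col_list : List (List String) := [["a", ""], [" ", "b"], ["c", "d", "  "]]

def Spec_clean_csv_by_col_list (data : List (List String)) (out : List (List String)) : Prop := out = clean_csv_by_col_list_alt data
instance (data : List (List String)) (out : List (List String)) : Decidable (Spec_clean_csv_by_col_list data out) := by unfold Spec_clean_csv_by_col_list; infer_instance

-- ===== CLAIM (what is proved, stated in full; the proofs are below) =====
def Claim_equal_clean_csv_by_col_list : Prop := ∀ (data : List (List String)), Dom_clean_csv_by_col_list data → Pre_clean_csv_by_col_list data → Spec_clean_csv_by_col_list data (clean_csv_by_col_list data)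

-- ===== LEMMAS AND PROOFS =====

-- getD through List.modify
theorem pvGetD_modify {α : Type} (l : List α) (n j : Nat) (d : α) (f : α → α) :
    (l.modify n f).getD j d =
      if j = n ∧ n < l.length then f (l.getD j d) else l.getD j d := by
  rw [List.getD_eq_getElem?_getD, List.getD_eq_getElem?_getD, List.getElem?_modify]
  rcases h : l[j]? with _ | v
  · have hj : ¬ j < l.length := by simpa [List.getElem?_eq_none_iff] using h
    simp only [Option.map_eq_map, Option.map_none, Option.getD_none]
    rw [if_neg (by rintro ⟨rfl, hn⟩; exact hj hn)]
  · have hj : j < l.length := by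
      by_contra hc
      rw [List.getElem?_eq_none_iff.2 (by omega)] at h; simp at h
    by_cases hjn : j = n
    · subst hjn
      simp [hj]
    · simp [hjn, Ne.symm hjn]

-- getD through List.set
theorem pvGetD_set {α : Type} (l : List α) (n j : Nat) (d x : α) :
    (l.set n x).getD j d = if j = n ∧ n < l.length then x else l.getD j d := by
  rw [List.set_eq_modify, pvGetD_modify]

-- the inner fold of A preserves the number of columns
theorem pvFoldLen (l : List (Int × String)) (cols : List (List String)) :
    (l.foldl (fun cs p => if PySem.Str.strip p.2 ≠ "" then cs.modify p.1.toNat (· ++ [p.2]) else cs) cols).length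
      = cols.length := by
  induction l generalizing cols with
  | nil => rfl
  | cons p l ih =>
    simp only [List.foldl_cons]
    rw [ih]
    split <;> simp [List.length_modify]

-- inner fold of A, characterized pointwise
theorem pvInner (row : List String) (cols : List (List String)) (n j : Nat) :
    ((PySem.List.enumerate row (n : Int)).foldl
      (fun cs p => if PySem.Str.strip p.2 ≠ "" then cs.modify p.1.toNat (· ++ [p.2]) else cs) cols).getD j []
    = cols.getD j [] ++
      (if n ≤ j ∧ j - n < row.length ∧ PySem.Str.strip (row.getD (j - n) "") ≠ "" ∧ j < cols.length
       then [row.getD (j - n) ""] else []) := by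
  induction row generalizing cols n with
  | nil =>
    simp [PySem.List.enumerate_nil]
  | cons c row ih =>
    rw [PySem.List.enumerate_cons]
    simp only [List.foldl_cons]
    have hcast : (n : Int) + 1 = ((n + 1 : Nat) : Int) := by push_cast; ring
    rw [hcast]
    by_cases hc : PySem.Str.strip c ≠ ""
    · rw [if_pos hc, ih (cols.modify (n : Int).toNat (· ++ [c])) (n + 1)]
      rw [Int.toNat_natCast, pvGetD_modify, List.length_modify]
      by_cases hjn : j = n
      · subst hjn
        have hgo : (c :: row).getD (j - j) "" = c := by rw [Nat.sub_self]; rfl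
        by_cases hjl : j < cols.length
        · rw [if_pos ⟨rfl, hjl⟩, if_neg (show ¬ (j + 1 ≤ j ∧ j - (j + 1) < row.length ∧
              PySem.Str.strip (row.getD (j - (j + 1)) "") ≠ "" ∧ j < cols.length) from
              by rintro ⟨h, -⟩; omega),
            if_pos ⟨le_refl j, by simp, by rw [hgo]; exact hc, hjl⟩, hgo]
          simp
        · rw [if_neg (by rintro ⟨-, h⟩; exact hjl h),
            if_neg (show ¬ (j + 1 ≤ j ∧ j - (j + 1) < row.length ∧
              PySem.Str.strip (row.getD (j - (j + 1)) "") ≠ "" ∧ j < cols.length) from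
              by rintro ⟨h, -⟩; omega),
            if_neg (by rintro ⟨-, -, -, h⟩; exact hjl h)]
      · rw [if_neg (by rintro ⟨h, -⟩; exact hjn h)]
        by_cases hnj : n + 1 ≤ j
        · have hg : (c :: row).getD (j - n) "" = row.getD (j - (n + 1)) "" := by
            rw [show j - n = (j - (n + 1)) + 1 from by omega, List.getD_cons_succ]
          by_cases hrest : j - (n + 1) < row.length ∧
              PySem.Str.strip (row.getD (j - (n + 1)) "") ≠ "" ∧ j < cols.length
          · rw [if_pos ⟨hnj, hrest.1, hrest.2.1, hrest.2.2⟩,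
              if_pos (show n ≤ j ∧ j - n < (c :: row).length ∧
                PySem.Str.strip ((c :: row).getD (j - n) "") ≠ "" ∧ j < cols.length from
                ⟨by omega, by simp; omega, by rw [hg]; exact hrest.2.1, hrest.2.2⟩), hg]
          · rw [if_neg (by rintro ⟨-, h1, h2, h3⟩; exact hrest ⟨h1, h2, h3⟩),
              if_neg (show ¬ (n ≤ j ∧ j - n < (c :: row).length ∧
                PySem.Str.strip ((c :: row).getD (j - n) "") ≠ "" ∧ j < cols.length) from
                by rintro ⟨-, h1, h2, h3⟩
                   exact hrest ⟨by simp at h1; omega, by rw [hg] at h2; exact h2, h3⟩)]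
        · rw [if_neg (by rintro ⟨h, -⟩; exact hnj h),
            if_neg (by rintro ⟨h, -⟩; omega)]
    · rw [if_neg hc, ih cols (n + 1)]
      congr 1
      by_cases hjn : j = n
      · subst hjn
        rw [if_neg (show ¬ (j + 1 ≤ j ∧ j - (j + 1) < row.length ∧
            PySem.Str.strip (row.getD (j - (j + 1)) "") ≠ "" ∧ j < cols.length) from
            by rintro ⟨h, -⟩; omega),
          if_neg (show ¬ (j ≤ j ∧ j - j < (c :: row).length ∧
            PySem.Str.strip ((c :: row).getD (j - j) "") ≠ "" ∧ j < cols.length) from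
            by rintro ⟨-, -, h, -⟩
               rw [show (c :: row).getD (j - j) "" = c from by rw [Nat.sub_self]; rfl] at h
               exact h (by simpa using hc))]
      · by_cases hnj : n + 1 ≤ j
        · have hg : (c :: row).getD (j - n) "" = row.getD (j - (n + 1)) "" := by
            rw [show j - n = (j - (n + 1)) + 1 from by omega, List.getD_cons_succ]
          by_cases hrest : j - (n + 1) < row.length ∧
              PySem.Str.strip (row.getD (j - (n + 1)) "") ≠ "" ∧ j < cols.length
          · rw [if_pos ⟨hnj, hrest.1, hrest.2.1, hrest.2.2⟩,
              if_pos (show n ≤ j ∧ j - n < (c :: row).length ∧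
                PySem.Str.strip ((c :: row).getD (j - n) "") ≠ "" ∧ j < cols.length from
                ⟨by omega, by simp; omega, by rw [hg]; exact hrest.2.1, hrest.2.2⟩), hg]
          · rw [if_neg (by rintro ⟨-, h1, h2, h3⟩; exact hrest ⟨h1, h2, h3⟩),
              if_neg (show ¬ (n ≤ j ∧ j - n < (c :: row).length ∧
                PySem.Str.strip ((c :: row).getD (j - n) "") ≠ "" ∧ j < cols.length) from
                by rintro ⟨-, h1, h2, h3⟩
                   exact hrest ⟨by simp at h1; omega, by rw [hg] at h2; exact h2, h3⟩)]
        · rw [if_neg (by rintro ⟨h, -⟩; exact hnj h),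
            if_neg (by rintro ⟨h, -⟩; omega)]

def pvP (j : Nat) (row : List String) : Bool :=
  decide (j < row.length) && (PySem.Str.strip (row.getD j "") != "")

-- one pvCleanStep, characterized pointwise (under the blank-tail condition for this row)
theorem pvStep (w : Nat) (row : List String) (cols : List (List String))
    (hlen : cols.length = w)
    (hbrow : ∀ i : Nat, i < row.length → w ≤ i → PySem.Str.strip (row.getD i "") = "") (j : Nat) :
    (pvCleanStep cols row).getD j []
      = cols.getD j [] ++ (if pvP j row then [row.getD j ""] else []) := by
  unfold pvCleanStep
  rw [show (0 : Int) = ((0 : Nat) : Int) from rfl, pvInner]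
  congr 1
  simp only [Nat.sub_zero, Nat.zero_le, true_and]
  by_cases h1 : j < row.length ∧ PySem.Str.strip (row.getD j "") ≠ ""
  · have hjw : j < cols.length := by
      rw [hlen]
      by_contra hcon
      exact h1.2 (hbrow j h1.1 (by omega))
    rw [if_pos ⟨h1.1, h1.2, hjw⟩, if_pos (by simp only [pvP, Bool.and_eq_true,
      decide_eq_true_eq, bne_iff_ne, ne_eq]; exact ⟨h1.1, h1.2⟩)]
  · rw [if_neg (by rintro ⟨ha, hb, -⟩; exact h1 ⟨ha, hb⟩),
      if_neg (by simp only [pvP, Bool.and_eq_true, decide_eq_true_eq, bne_iff_ne, ne_eq]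
                 rintro ⟨ha, hb⟩; exact h1 ⟨ha, hb⟩)]

-- outer fold of A, characterized pointwise (under the blank-tail condition)
theorem pvOuter (w : Nat) (rows : List (List String)) :
    ∀ cols : List (List String), cols.length = w →
    (∀ row ∈ rows, ∀ i : Nat, i < row.length → w ≤ i → PySem.Str.strip (row.getD i "") = "") →
    (rows.foldl pvCleanStep cols).length = w ∧
    ∀ j, (rows.foldl pvCleanStep cols).getD j []
      = cols.getD j [] ++ (rows.filter (pvP j)).map (fun row => row.getD j "") := by
  induction rows with
  | nil =>
    intro cols hlen _
    exact ⟨hlen, fun j => by simp⟩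
  | cons row rows ih =>
    intro cols hlen hb
    simp only [List.foldl_cons]
    have hlen1 : (pvCleanStep cols row).length = w := by
      unfold pvCleanStep; rw [pvFoldLen]; exact hlen
    obtain ⟨ihlen, ihget⟩ := ih (pvCleanStep cols row) hlen1
      (fun r hr => hb r (List.mem_cons_of_mem _ hr))
    refine ⟨ihlen, fun j => ?_⟩
    rw [ihget j, pvStep w row cols hlen (hb row (List.mem_cons_self)) j, List.filter_cons]
    by_cases hp : pvP j row
    · rw [if_pos (by simp [hp])]
      simp [List.append_assoc, hp]
    · rw [if_neg (by simp [hp])]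
      simp [hp]

-- pvZipStar on an equal-length non-empty family is the index-driven transpose
theorem pvZipStar_eq (L : Nat) (cols : List (List String)) (hne : cols ≠ [])
    (hl : ∀ c ∈ cols, c.length = L) :
    pvZipStar cols = (List.range L).map (fun r => cols.map (fun c => c.getD r "")) := by
  induction L generalizing cols with
  | zero =>
    rw [pvZipStar]
    rw [dif_pos]
    · simp
    · rcases cols with _ | ⟨c, cs⟩
      · exact Or.inl rfl
      · refine Or.inr ?_
        simp only [List.any_cons, Bool.or_eq_true]
        exact Or.inl (by
          have := hl c (List.mem_cons_self)
          simpa [List.isEmpty_iff, List.length_eq_zero_iff] using this)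
  | succ L ih =>
    rw [pvZipStar]
    rw [dif_neg]
    · have htl : ∀ t ∈ cols.map (·.tail), t.length = L := by
        intro t ht
        obtain ⟨c, hc, rfl⟩ := List.mem_map.1 ht
        have := hl c hc
        simp [this]
      have hne' : cols.map (·.tail) ≠ [] := by
        simpa using hne
      rw [ih (cols.map (·.tail)) hne' htl]
      rw [List.range_succ_eq_map, List.map_cons, List.map_map]
      congr 1
      · apply List.map_congr_left
        intro c hc
        have := hl c hc
        rcases c with _ | ⟨x, xs⟩
        · simp at this
        · rfl
      · apply List.map_congr_left
        intro r _
        simp only [Function.comp, List.map_map]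
        apply List.map_congr_left
        intro c _
        rcases c with _ | ⟨x, xs⟩
        · rfl
        · rfl
    · rintro (rfl | hany)
      · exact hne rfl
      · rw [List.any_eq_true] at hany
        obtain ⟨c, hc, hemp⟩ := hany
        have := hl c hc
        rw [List.isEmpty_iff] at hemp
        subst hemp
        simp at this

-- padded column lookup = guarded lookup in the unpadded column
theorem pvPadGetD (c : List String) (L r : Nat) :
    (c ++ List.replicate (L - c.length) "").getD r "" =
      if r < c.length then c.getD r "" else "" := by
  by_cases h : r < c.length
  · rw [List.getD_append _ _ _ _ h, if_pos h]
  · rw [List.getD_append_right _ _ _ _ (by omega), if_neg h]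
    by_cases h2 : r - c.length < L - c.length
    · rw [List.getD_replicate _ h2]
    · rw [List.getD_eq_default]
      simpa using (by omega : L - c.length ≤ r - c.length)

theorem pvReplicateGetD {α : Type} (d : α) (w j : Nat) :
    (List.replicate w d).getD j d = d := by
  by_cases h : j < w
  · rw [List.getD_replicate _ h]
  · rw [List.getD_eq_default]
    simpa using (by omega : w ≤ j)

-- ===== B-side: the grid invariant =====

-- out/fill describe exactly the compacted columns `cols` built so far
def pvInv (w : Nat) (cols : Nat → List String) (st : List (List String) × List Nat) : Prop :=
  st.2.length = w ∧
  (∀ j, j < w → st.2.getD j 0 = (cols j).length) ∧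
  (∀ j, j < w → (cols j).length ≤ st.1.length) ∧
  (st.1.length = 0 ∨ ∃ j, j < w ∧ (cols j).length = st.1.length) ∧
  (∀ r, r < st.1.length → (st.1.getD r []).length = w ∧
     ∀ j, j < w → (st.1.getD r []).getD j "" =
       if r < (cols j).length then (cols j).getD r "" else "")

theorem pvInvCongr (w : Nat) (cols cols' : Nat → List String)
    (h : ∀ j, j < w → cols j = cols' j) (st : List (List String) × List Nat)
    (hI : pvInv w cols st) : pvInv w cols' st := by
  obtain ⟨h1, h2, h3, h4, h5⟩ := hI
  refine ⟨h1, fun j hj => by rw [← h j hj]; exact h2 j hj,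
    fun j hj => by rw [← h j hj]; exact h3 j hj, ?_, fun r hr => ?_⟩
  · rcases h4 with h4 | ⟨j, hj, hl⟩
    · exact Or.inl h4
    · exact Or.inr ⟨j, hj, by rw [← h j hj]; exact hl⟩
  · obtain ⟨ha, hb⟩ := h5 r hr
    exact ⟨ha, fun j hj => by rw [← h j hj]; exact hb j hj⟩

theorem pvInvPlace (w : Nat) (cols : Nat → List String)
    (st : List (List String) × List Nat) (j : Nat) (cell : String)
    (hj : j < w) (hI : pvInv w cols st) :
    pvInv w (fun k => if k = j then cols j ++ [cell] else cols k) (pvPlace w st j cell) := by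
  obtain ⟨h1, h2, h3, h4, h5⟩ := hI
  obtain ⟨out, fill⟩ := st
  simp only at h1 h2 h3 h4 h5
  have hr : fill.getD j 0 = (cols j).length := h2 j hj
  set r := (cols j).length with hrdef
  have hrle : r ≤ out.length := h3 j hj
  unfold pvPlace
  simp only [hr]
  set out' := if r = out.length then out ++ [List.replicate w ""] else out with hout'
  have hlen' : out'.length = if r = out.length then out.length + 1 else out.length := by
    rw [hout']; split <;> simp
  have hrlt : r < out'.length := by
    rw [hlen']; split <;> omega
  have hget' : ∀ r', r' < out.length → out'.getD r' [] = out.getD r' [] := by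
    intro r' hr'
    rw [hout']; split
    · rw [List.getD_append _ _ _ _ hr']
    · rfl
  have hgetr : out'.getD r [] = if r = out.length then List.replicate w "" else out.getD r [] := by
    split
    · rename_i h
      rw [hout', if_pos h, h, List.getD_append_right _ _ _ _ (le_refl _), Nat.sub_self]
      rfl
    · rename_i h
      exact hget' r (by omega)
  have hrowlen : ∀ r', r' < out'.length → (out'.getD r' []).length = w := by
    intro r' hr'
    by_cases hre : r' = r
    · subst hre
      rw [hgetr]; split
      · simp
      · exact (h5 r (by rw [hlen'] at hr'; split at hr' <;> omega)).1
    · have hro : r' < out.length := by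
        rw [hlen'] at hr'
        split at hr' <;> omega
      rw [hget' r' hro]
      exact (h5 r' hro).1
  clear_value r out'
  constructor
  · simpa using h1
  constructor
  · intro k hk
    beta_reduce
    rw [pvGetD_modify]
    by_cases hkj : k = j
    · subst hkj
      rw [if_pos ⟨rfl, by omega⟩, hr, if_pos rfl]
      simp only [List.length_append, List.length_singleton]
      omega
    · rw [if_neg (by rintro ⟨h, -⟩; exact hkj h), if_neg hkj]
      exact h2 k hk
  constructor
  · intro k hk
    beta_reduce
    simp only [List.length_modify]
    by_cases hkj : k = j
    · subst hkj
      rw [if_pos rfl, hlen']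
      have hlapp : (cols k ++ [cell]).length = (cols k).length + 1 := by simp
      rw [hlapp]
      split <;> omega
    · rw [if_neg hkj, hlen']
      have := h3 k hk
      split <;> omega
  constructor
  · refine Or.inr ?_
    simp only [List.length_modify]
    by_cases hre : r = out.length
    · refine ⟨j, hj, ?_⟩
      beta_reduce
      rw [if_pos rfl, hlen', if_pos hre]
      simp only [List.length_append, List.length_singleton]
      omega
    · have hpos : 0 < out.length := by omega
      rcases h4 with h4 | ⟨j0, hj0, hl0⟩
      · omega
      · have hj0j : j0 ≠ j := by
          intro h; subst h; rw [← hrdef] at hl0; omega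
        exact ⟨j0, hj0, by rw [if_neg hj0j, hlen', if_neg hre]; exact hl0⟩
  · intro r' hr'
    beta_reduce
    rw [List.length_modify] at hr'
    rw [pvGetD_modify]
    by_cases hre : r' = r
    · subst hre
      rw [if_pos ⟨rfl, hrlt⟩]
      have hlenrow : (out'.getD r' []).length = w := hrowlen r' hrlt
      refine ⟨by rw [List.length_set]; exact hlenrow, ?_⟩
      intro k hk
      rw [pvGetD_set]
      by_cases hkj : k = j
      · subst hkj
        rw [if_pos ⟨rfl, by rw [hlenrow]; exact hj⟩]
        simp only [if_true]
        rw [if_pos (show r' < (cols k ++ [cell]).length by simp [hrdef])]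
        rw [hrdef, List.getD_append_right _ _ _ _ (le_refl _), Nat.sub_self]
        rfl
      · rw [if_neg (by rintro ⟨h, -⟩; exact hkj h)]
        simp only [if_neg hkj]
        by_cases hre2 : r' = out.length
        · rw [hgetr, if_pos hre2, List.getD_replicate _ hk,
            if_neg (by have := h3 k hk; omega)]
        · rw [hgetr, if_neg hre2]
          exact (h5 r' (by omega)).2 k hk
    · rw [if_neg (by rintro ⟨h, -⟩; exact hre h)]
      have hro : r' < out.length := by
        rw [hlen'] at hr'
        split at hr' <;> omega
      rw [hget' r' hro]
      obtain ⟨ha, hb⟩ := h5 r' hro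
      refine ⟨ha, ?_⟩
      intro k hk
      rw [hb k hk]
      by_cases hkj : k = j
      · subst hkj
        simp only [if_true]
        by_cases hlt : r' < (cols k).length
        · rw [if_pos hlt, if_pos (show r' < (cols k ++ [cell]).length from by simp only [List.length_append, List.length_singleton]; omega)]
          rw [List.getD_append _ _ _ _ hlt]
        · rw [if_neg hlt, if_neg (show ¬ r' < (cols k ++ [cell]).length from by simp only [List.length_append, List.length_singleton]; omega)]
      · simp only [if_neg hkj]

-- inner loop of B, characterized: the placements of one row extend the columns exactly
-- as A's filtered append does (under the blank-tail condition for this row)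
theorem pvInvRow (w : Nat) (row : List String) :
    ∀ (n : Nat) (cols : Nat → List String) (st : List (List String) × List Nat),
    pvInv w cols st →
    (∀ i, i < row.length → w ≤ n + i → PySem.Str.strip (row.getD i "") = "") →
    pvInv w (fun k => if n ≤ k ∧ k - n < row.length ∧
        PySem.Str.strip (row.getD (k - n) "") ≠ ""
        then cols k ++ [row.getD (k - n) ""] else cols k)
      ((PySem.List.enumerate row (n : Int)).foldl
        (fun st p => if PySem.Str.strip p.2 ≠ "" then pvPlace w st p.1.toNat p.2 else st) st) := by
  induction row with
  | nil =>
    intro n cols st hI _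
    rw [PySem.List.enumerate_nil]
    exact pvInvCongr w cols _ (fun k _ => by rw [if_neg (by rintro ⟨-, h, -⟩; simp at h)]) st hI
  | cons c row ih =>
    intro n cols st hI hbl
    rw [PySem.List.enumerate_cons]
    simp only [List.foldl_cons]
    have hcast : (n : Int) + 1 = ((n + 1 : Nat) : Int) := by push_cast; ring
    rw [hcast]
    by_cases hc : PySem.Str.strip c ≠ ""
    · rw [if_pos hc, Int.toNat_natCast]
      have hnw : n < w := by
        by_contra hcon
        exact hc (hbl 0 (by simp) (by omega))
      have hI1 := pvInvPlace w cols st n c hnw hI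
      have hI2 := ih (n + 1) _ _ hI1
        (fun i hi hwi => hbl (i + 1) (by simpa using hi) (by omega))
      refine pvInvCongr w _ _ ?_ _ hI2
      intro k hk
      beta_reduce
      by_cases hkn : k = n
      · subst hkn
        simp only [if_true]
        rw [if_neg (by rintro ⟨h, -⟩; omega)]
        rw [if_pos (show k ≤ k ∧ k - k < (c :: row).length ∧
          PySem.Str.strip ((c :: row).getD (k - k) "") ≠ "" from
          ⟨le_refl k, by simp, by simpa [Nat.sub_self] using hc⟩)]
        simp
      · by_cases hnk : n + 1 ≤ k
        · have hg : (c :: row).getD (k - n) "" = row.getD (k - (n + 1)) "" := by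
            rw [show k - n = (k - (n + 1)) + 1 from by omega, List.getD_cons_succ]
          by_cases hrest : k - (n + 1) < row.length ∧
              PySem.Str.strip (row.getD (k - (n + 1)) "") ≠ ""
          · rw [if_pos ⟨hnk, hrest.1, hrest.2⟩, if_neg (by rintro ⟨h, -⟩; omega),
              if_pos ⟨by omega, by simp only [List.length_cons]; omega,
                by rw [hg]; exact hrest.2⟩, hg]
          · rw [if_neg (by rintro ⟨-, h1, h2⟩; exact hrest ⟨h1, h2⟩),
              if_neg (by rintro ⟨h, -⟩; omega),
              if_neg (by rintro ⟨-, h1, h2⟩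
                         exact hrest ⟨by simp only [List.length_cons] at h1; omega,
                           by rw [hg] at h2; exact h2⟩)]
        · rw [if_neg (by rintro ⟨h, -⟩; exact hnk h),
            if_neg (by rintro ⟨h, -⟩; exact hkn (by omega)),
            if_neg (by rintro ⟨h, -⟩; omega)]
    · rw [if_neg hc]
      have hI2 := ih (n + 1) cols st hI
        (fun i hi hwi => hbl (i + 1) (by simpa using hi) (by omega))
      refine pvInvCongr w _ _ ?_ _ hI2
      intro k hk
      beta_reduce
      by_cases hkn : k = n
      · subst hkn
        rw [if_neg (by rintro ⟨h, -⟩; omega),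
          if_neg (by rintro ⟨-, -, h⟩
                     rw [show (c :: row).getD (k - k) "" = c from
                       by rw [Nat.sub_self]; rfl] at h
                     exact h (by simpa using hc))]
      · by_cases hnk : n + 1 ≤ k
        · have hg : (c :: row).getD (k - n) "" = row.getD (k - (n + 1)) "" := by
            rw [show k - n = (k - (n + 1)) + 1 from by omega, List.getD_cons_succ]
          by_cases hrest : k - (n + 1) < row.length ∧
              PySem.Str.strip (row.getD (k - (n + 1)) "") ≠ ""
          · rw [if_pos ⟨hnk, hrest.1, hrest.2⟩,
              if_pos ⟨by omega, by simp only [List.length_cons]; omega,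
                by rw [hg]; exact hrest.2⟩, hg]
          · rw [if_neg (by rintro ⟨-, h1, h2⟩; exact hrest ⟨h1, h2⟩),
              if_neg (by rintro ⟨-, h1, h2⟩
                         exact hrest ⟨by simp only [List.length_cons] at h1; omega,
                           by rw [hg] at h2; exact h2⟩)]
        · rw [if_neg (by rintro ⟨h, -⟩; exact hnk h),
            if_neg (by rintro ⟨h, -⟩; omega)]

-- outer loop of B: after all rows, out/fill describe A's filtered columns
theorem pvInvFold (w : Nat) (rows : List (List String)) :
    ∀ (cols : Nat → List String) (st : List (List String) × List Nat),
    pvInv w cols st →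
    (∀ row ∈ rows, ∀ i : Nat, i < row.length → w ≤ i → PySem.Str.strip (row.getD i "") = "") →
    pvInv w (fun k => cols k ++ (rows.filter (pvP k)).map (fun row => row.getD k ""))
      (rows.foldl (pvBRow w) st) := by
  induction rows with
  | nil =>
    intro cols st hI _
    exact pvInvCongr w cols _ (fun k _ => by simp) st hI
  | cons row rows ih =>
    intro cols st hI hb
    simp only [List.foldl_cons]
    have hI1 : pvInv w (fun k => cols k ++ (if pvP k row then [row.getD k ""] else []))
        (pvBRow w st row) := by
      unfold pvBRow
      have h0 := pvInvRow w row 0 cols st hI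
        (fun i hi hwi => hb row List.mem_cons_self i hi (by omega))
      rw [show ((0 : Nat) : Int) = (0 : Int) from rfl] at h0
      refine pvInvCongr w _ _ ?_ _ h0
      intro k hk
      beta_reduce
      simp only [Nat.sub_zero, Nat.zero_le, true_and]
      by_cases h1 : k < row.length ∧ PySem.Str.strip (row.getD k "") ≠ ""
      · rw [if_pos h1, if_pos (by simp only [pvP, Bool.and_eq_true,
          decide_eq_true_eq, bne_iff_ne, ne_eq]; exact h1)]
      · rw [if_neg h1, if_neg (by simp only [pvP, Bool.and_eq_true,
          decide_eq_true_eq, bne_iff_ne, ne_eq]; exact h1)]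
        simp
    have hI2 := ih _ _ hI1 (fun r hr => hb r (List.mem_cons_of_mem _ hr))
    refine pvInvCongr w _ _ ?_ _ hI2
    intro k hk
    beta_reduce
    rw [List.filter_cons]
    by_cases hp : pvP k row
    · rw [if_pos (by simp [hp])]
      simp [List.append_assoc, hp]
    · rw [if_neg (by simp [hp])]
      simp [hp]

-- getD through List.map (with a default on each side)
theorem pvGetD_map {α β : Type} (f : α → β) (l : List α) (j : Nat) (da : α) (db : β)
    (h : j < l.length) : (l.map f).getD j db = f (l.getD j da) := by
  rw [List.getD_eq_getElem _ _ (by simpa using h), List.getD_eq_getElem _ _ h,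
    List.getElem_map]

-- list extensionality via getD at a fixed default
theorem pvExtGetD {α : Type} (d : α) (xs ys : List α) (hlen : xs.length = ys.length)
    (h : ∀ i, i < xs.length → xs.getD i d = ys.getD i d) : xs = ys := by
  apply List.ext_getElem hlen
  intro i h1 h2
  rw [← List.getD_eq_getElem xs d h1, ← List.getD_eq_getElem ys d h2]
  exact h i h1

-- ===== VERDICT (by name: the statement is the Claim_ definition above) =====
theorem clean_csv_by_col_list_spec : Claim_equal_clean_csv_by_col_list := by
  unfold Claim_equal_clean_csv_by_col_list
  intro data _ hpre
  obtain ⟨hne, hw0, hb⟩ := hpre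
  unfold Spec_clean_csv_by_col_list
  have hie : data.isEmpty = false := by simpa [List.isEmpty_iff] using hne
  simp only [clean_csv_by_col_list, clean_csv_by_col_list_alt, hie, Bool.false_eq_true,
    if_false]
  set w := (data.headD []).length with hw
  -- A's columns
  set colsA := data.foldl pvCleanStep (List.replicate w []) with hcolsA
  obtain ⟨hAlen, hAget⟩ := pvOuter w data (List.replicate w []) (by simp) hb
  rw [← hcolsA] at hAlen hAget
  have hAget' : ∀ j, colsA.getD j [] =
      (data.filter (pvP j)).map (fun row => row.getD j "") := by
    intro j
    rw [hAget j, pvReplicateGetD, List.nil_append]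
  set colF : Nat → List String := fun j => (data.filter (pvP j)).map (fun row => row.getD j "")
    with hcolF
  -- B's final state satisfies the invariant for colF
  have hI0 : pvInv w (fun _ => ([] : List String)) ([], List.replicate w 0) := by
    refine ⟨by simp, fun j hj => by simp, fun j hj => by simp,
      Or.inl rfl, fun r hr => by simp at hr⟩
  have hI := pvInvFold w data _ _ hI0 hb
  have hI' : pvInv w colF (data.foldl (pvBRow w) ([], List.replicate w 0)) :=
    pvInvCongr w _ _ (fun k _ => by simp [hcolF]) _ hI
  obtain ⟨h1, h2, h3, h4, h5⟩ := hI'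
  set st := data.foldl (pvBRow w) ([], List.replicate w 0) with hst
  set M := st.1.length with hM
  have hwpos : 0 < w := by omega
  -- the column-length lists agree
  have hlm : colsA.map (·.length) = (List.range w).map (fun j => (colF j).length) := by
    refine pvExtGetD 0 _ _ (by simp [hAlen]) ?_
    intro j hj
    have hjw : j < w := by simpa [hAlen] using hj
    rw [pvGetD_map _ _ _ [] 0 (by simpa [hAlen] using hj)]
    rw [pvGetD_map _ _ _ 0 0 (by simpa using hjw)]
    rw [show (List.range w).getD j 0 = j from
      by rw [List.getD_eq_getElem _ _ (by simpa using hjw)]; simp]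
    rw [hAget' j]
  -- maxLen computed by A equals B's number of output rows
  have hmne : colsA.map (·.length) ≠ [] := by
    rw [hlm]; simp; omega
  obtain ⟨m, hm⟩ : ∃ m, PySem.List.max? (colsA.map (·.length)) (fun x => x) = some m := by
    rcases hmax : PySem.List.max? (colsA.map (·.length)) (fun x => x) with _ | m
    · rw [PySem.List.max?_eq_none_iff] at hmax
      exact absurd hmax hmne
    · exact ⟨m, hmax⟩
  have hmM : m = M := by
    have hmem := PySem.List.max?_mem hm
    rw [hlm] at hmem
    obtain ⟨j, hj, hjm⟩ := List.mem_map.1 hmem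
    rw [List.mem_range] at hj
    have hup : m ≤ M := by rw [← hjm, hM]; exact h3 j hj
    have hdn : M ≤ m := by
      rcases h4 with h4 | ⟨j0, hj0, hl0⟩
      · omega
      · have := PySem.List.max?_isMax hm ((colF j0).length)
          (by rw [hlm]
              exact List.mem_map.2 ⟨j0, List.mem_range.2 hj0, rfl⟩)
        simp only at this
        omega
    omega
  rw [hm]
  simp only [Option.getD_some, hmM]
  -- A's padded transpose, in index form
  have hpadlen : ∀ c ∈ colsA.map (fun c => c ++ List.replicate (M - c.length) ""),
      c.length = M := by
    intro c hc
    obtain ⟨d, hd, rfl⟩ := List.mem_map.1 hc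
    obtain ⟨j, hj, rfl⟩ := List.getElem_of_mem hd
    have hjw : j < w := by rwa [hAlen] at hj
    have : colsA[j].length ≤ M := by
      rw [← List.getD_eq_getElem _ [] hj, hAget' j, hM]
      exact h3 j hjw
    simp only [List.length_append, List.length_replicate]
    omega
  have hpadne : colsA.map (fun c => c ++ List.replicate (M - c.length) "") ≠ [] := by
    intro h
    rw [List.map_eq_nil_iff] at h
    rw [h] at hAlen
    exact hw0 hAlen.symm
  rw [pvZipStar_eq M _ hpadne hpadlen]
  -- compare with B's grid, row by row then cell by cell
  refine pvExtGetD [] _ _ (by simp [hM]) ?_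
  intro r hr
  have hrM : r < M := by simpa using hr
  obtain ⟨hrowlen, hrowget⟩ := h5 r (by omega)
  rw [pvGetD_map _ _ _ 0 [] (by simpa using hrM)]
  rw [show (List.range M).getD r 0 = r from
    by rw [List.getD_eq_getElem _ _ (by simpa using hrM)]; simp]
  refine pvExtGetD "" _ _ ?_ ?_
  · simp only [List.length_map]
    rw [hAlen, hrowlen]
  · intro j hj'
    have hjw : j < w := by
      simp only [List.length_map] at hj'
      rwa [hAlen] at hj'
    rw [pvGetD_map _ _ _ [] "" (by simpa [hAlen] using hj')]
    rw [pvGetD_map _ _ _ [] [] (show j < colsA.length by omega)]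
    rw [hAget' j, pvPadGetD, hrowget j hjw]
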